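-- pv_equiv track=rewrite | github.com/naamawagner/Effectidor | pipeline/pip_box_features.py | create_box_one_mismatch
-- ===== SOURCE A (Python) =====
-- def create_box_one_mismatch(box_list):
--     box_one_mismatch = []
--     for i in range(len(box_list)):
--         li = list(box_list)
--         if li[i] != '[ATGC]':
--             li[i] = '[ATGC]'
--             motif = ''.join(li)
--             box_one_mismatch.append(motif)
--     box_one_mismatch = '|'.join(box_one_mismatch)
--     return box_one_mismatch
-- ===== SOURCE B (Python) =====
-- def create_box_one_mismatch(box_list):
--     # prefix/suffix table decomposition: precompute all suffix joins once,
--     # then sweep left-to-right growing the prefix join.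
--     items = list(box_list)
--     suffixes = ['']
--     for s in reversed(items):
--         suffixes = [s + suffixes[0]] + suffixes
--     out = []
--     prefix = ''
--     for s, suf in zip(items, suffixes[1:]):
--         if s != '[ATGC]':
--             out.append(prefix + '[ATGC]' + suf)
--         prefix += s
--     return '|'.join(out)
-- ===== Notes on version B (the rewrite author's own statement) =====
-- stated objective: alternative
-- what changed: A copies the whole list and rejoins it for every index; B precomputes a suffix-join table right-to-left, then makes one left-to-right sweep with a growing prefix join, assembling each motif as prefix + '[ATGC]' + suffix.
import Mathlib
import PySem

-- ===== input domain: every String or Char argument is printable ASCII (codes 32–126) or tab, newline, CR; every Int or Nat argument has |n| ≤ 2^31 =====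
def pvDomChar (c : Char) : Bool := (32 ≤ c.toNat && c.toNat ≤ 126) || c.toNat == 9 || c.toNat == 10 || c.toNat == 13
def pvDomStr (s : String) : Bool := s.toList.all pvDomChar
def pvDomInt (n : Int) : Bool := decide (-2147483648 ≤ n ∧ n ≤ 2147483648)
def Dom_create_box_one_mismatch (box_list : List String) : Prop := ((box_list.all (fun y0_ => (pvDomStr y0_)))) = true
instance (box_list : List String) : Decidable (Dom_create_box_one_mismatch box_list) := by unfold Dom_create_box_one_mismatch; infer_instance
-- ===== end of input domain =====

-- B replaces A's per-index copy-the-list-and-rejoin with a prefix/suffix-table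
-- decomposition (one suffix-join table built right-to-left, then one left-to-right
-- sweep growing the prefix join); objective: alternative decomposition, same results.


-- ===== PORT A =====
def create_box_one_mismatch (box_list : List String) : String :=
  let box_one_mismatch :=
    (PySem.List.pyRange 0 (box_list.length : Int) 1).foldl (fun acc i =>
      let li := box_list                               -- li = list(box_list)
      if PySem.List.pyGetD li i "" ≠ "[ATGC]" then     -- li[i] != '[ATGC]' (i always in range)
        acc ++ [PySem.Str.join "" (PySem.List.pySetD li i "[ATGC]")]  -- li[i] = '[ATGC]'; ''.join(li)
      else acc) ([] : List String)
  PySem.Str.join "|" box_one_mismatch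

-- ===== PORT B =====
-- suffixes = ['']; for s in reversed(items): suffixes = [s + suffixes[0]] + suffixes
def pvSuffixes : List String → List String
  | [] => [""]
  | s :: rest => (s ++ (pvSuffixes rest).headD "") :: pvSuffixes rest

def create_box_one_mismatch_alt (box_list : List String) : String :=
  let suffixes := pvSuffixes box_list
  let st := (box_list.zip (suffixes.drop 1)).foldl     -- for s, suf in zip(items, suffixes[1:])
    (fun (st : List String × String) p =>
      let out := if p.1 ≠ "[ATGC]" then st.1 ++ [st.2 ++ "[ATGC]" ++ p.2] else st.1
      (out, st.2 ++ p.1))                              -- prefix += s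
    (([] : List String), "")
  PySem.Str.join "|" st.1

-- ===== PRECONDITION & SPEC =====
def Spec_create_box_one_mismatch (box_list : List String) (out : String) : Prop := out = create_box_one_mismatch_alt box_list
instance (box_list : List String) (out : String) : Decidable (Spec_create_box_one_mismatch box_list out) := by unfold Spec_create_box_one_mismatch; infer_instance

-- ===== CLAIM (what is proved, stated in full; the proofs are below) =====
def Claim_equal_create_box_one_mismatch : Prop := ∀ (box_list : List String), Dom_create_box_one_mismatch box_list → Spec_create_box_one_mismatch box_list (create_box_one_mismatch box_list)

-- ===== LEMMAS AND PROOFS =====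

-- ''.join as a cons-step on strings
theorem pvJoinEmpty_cons (a : String) (l : List String) :
    PySem.Str.join "" (a :: l) = a ++ PySem.Str.join "" l := by
  apply String.toList_inj.mp
  simp [PySem.Str.toList_join]
  cases l with
  | nil => simp [PySem.Chars.join_singleton, PySem.Chars.join_nil]
  | cons b r => simp [PySem.Chars.join_cons_cons]

-- reference list of motifs, structural on the box list
def pvMotifs : List String → List String
  | [] => []
  | x :: xs =>
    (if x ≠ "[ATGC]" then ["[ATGC]" ++ PySem.Str.join "" xs] else [])
      ++ (pvMotifs xs).map (fun m => x ++ m)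

theorem pvSuffixes_ne_nil (xs : List String) :
    pvSuffixes xs = (pvSuffixes xs).headD "" :: (pvSuffixes xs).drop 1 := by
  cases xs <;> simp [pvSuffixes]

theorem pvSuffixes_headD (xs : List String) :
    (pvSuffixes xs).headD "" = PySem.Str.join "" xs := by
  induction xs with
  | nil =>
    apply String.toList_inj.mp
    simp [pvSuffixes, PySem.Str.toList_join, PySem.Chars.join_nil]
  | cons x t ih =>
    simp only [pvSuffixes, List.headD_cons, ih, pvJoinEmpty_cons]

theorem pvJoinEmpty_nil : PySem.Str.join "" ([] : List String) = "" := by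
  apply String.toList_inj.mp
  simp [PySem.Str.toList_join, PySem.Chars.join_nil]

-- A's fold equals the reference motif list
theorem pvA_eq_motifs (xs : List String) (acc : List String) :
    (PySem.List.pyRange 0 (xs.length : Int) 1).foldl (fun acc i =>
      if PySem.List.pyGetD xs i "" ≠ "[ATGC]" then
        acc ++ [PySem.Str.join "" (PySem.List.pySetD xs i "[ATGC]")]
      else acc) acc = acc ++ pvMotifs xs := by
  induction xs generalizing acc with
  | nil => simp [PySem.List.pyRange_one_eq_nil, pvMotifs]
  | cons x t ih =>
    rw [show ((x :: t).length : Int) = ((t.length + 1 : Nat) : Int) by simp,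
        PySem.List.pyRange_zero_nat, List.range_succ_eq_map]
    simp only [List.map_cons, List.foldl_cons, List.map_map, List.foldl_map]
    have h0get : PySem.List.pyGetD (x :: t) ((0 : Nat) : Int) "" = x :=
      PySem.List.pyGetD_natCast (x :: t) 0 ""
    have h0set : PySem.List.pySetD (x :: t) ((0 : Nat) : Int) "[ATGC]" = "[ATGC]" :: t :=
      PySem.List.pySetD_natCast (x :: t) 0 "[ATGC]"
    simp only [Nat.cast_zero] at h0get h0set
    have hfun : ∀ (acc : List String) (k : Nat),
        (if PySem.List.pyGetD (x :: t) (((k + 1 : Nat) : Int)) "" ≠ "[ATGC]" then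
          acc ++ [PySem.Str.join "" (PySem.List.pySetD (x :: t) (((k + 1 : Nat) : Int)) "[ATGC]")]
        else acc)
        = (if t.getD k "" ≠ "[ATGC]" then
            acc ++ [x ++ PySem.Str.join "" (t.set k "[ATGC]")]
          else acc) := by
      intro acc k
      rw [PySem.List.pyGetD_natCast, PySem.List.pySetD_natCast]
      simp [pvJoinEmpty_cons]
    -- specialize ih, in closed filter/map form
    have ihc : ((List.range t.length).filter
          (fun k => decide (t.getD k "" ≠ "[ATGC]"))).map
            (fun k => PySem.Str.join "" (t.set k "[ATGC]")) = pvMotifs t := by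
      have := ih ([] : List String)
      rw [PySem.List.pyRange_zero_nat, List.foldl_map] at this
      have hfun' : ∀ (acc : List String) (k : Nat),
          (if PySem.List.pyGetD t (((k : Nat)) : Int) "" ≠ "[ATGC]" then
            acc ++ [PySem.Str.join "" (PySem.List.pySetD t (((k : Nat)) : Int) "[ATGC]")]
          else acc)
          = (if t.getD k "" ≠ "[ATGC]" then
              acc ++ [PySem.Str.join "" (t.set k "[ATGC]")]
            else acc) := by
        intro acc k
        rw [PySem.List.pyGetD_natCast, PySem.List.pySetD_natCast]
      simp only [hfun'] at this
      rw [PySem.List.foldl_append_ite (fun k => t.getD k "" ≠ "[ATGC]")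
            (fun k => PySem.Str.join "" (t.set k "[ATGC]"))] at this
      simpa using this
    have hfe : (fun (acc : List String) (k : Nat) =>
        if PySem.List.pyGetD (x :: t) (((k + 1 : Nat) : Int)) "" ≠ "[ATGC]" then
          acc ++ [PySem.Str.join "" (PySem.List.pySetD (x :: t) (((k + 1 : Nat) : Int)) "[ATGC]")]
        else acc)
        = (fun acc k => if t.getD k "" ≠ "[ATGC]" then
            acc ++ [x ++ PySem.Str.join "" (t.set k "[ATGC]")] else acc) := by
      funext acc k; exact hfun acc k
    simp only [Function.comp_def, Nat.succ_eq_add_one, Nat.cast_zero]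
    rw [hfe, PySem.List.foldl_append_ite (fun k => t.getD k "" ≠ "[ATGC]")
          (fun k => x ++ PySem.Str.join "" (t.set k "[ATGC]"))]
    have hmap : ((List.range t.length).filter
          (fun k => decide (t.getD k "" ≠ "[ATGC]"))).map
            (fun k => x ++ PySem.Str.join "" (t.set k "[ATGC]"))
        = (pvMotifs t).map (fun m => x ++ m) := by
      rw [← ihc, List.map_map]
      rfl
    rw [hmap, h0get, h0set, pvJoinEmpty_cons]
    show _ = acc ++ pvMotifs (x :: t)
    simp only [pvMotifs]
    split_ifs <;> simp [List.append_assoc]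

theorem pvB_eq_motifs (xs : List String) (out : List String) (p : String) :
    (xs.zip ((pvSuffixes xs).drop 1)).foldl
      (fun (st : List String × String) q =>
        let o := if q.1 ≠ "[ATGC]" then st.1 ++ [st.2 ++ "[ATGC]" ++ q.2] else st.1
        (o, st.2 ++ q.1)) (out, p)
    = (out ++ (pvMotifs xs).map (fun m => p ++ m), p ++ PySem.Str.join "" xs) := by
  induction xs generalizing out p with
  | nil => simp [pvSuffixes, pvMotifs, pvJoinEmpty_nil, String.append_empty]
  | cons x t ih =>
    rw [show (pvSuffixes (x :: t)).drop 1 = pvSuffixes t from rfl,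
        pvSuffixes_ne_nil t, List.zip_cons_cons, List.foldl_cons]
    simp only [pvSuffixes_headD]
    rw [ih]
    simp only [pvMotifs, pvJoinEmpty_cons]
    refine Prod.ext ?_ ?_
    · show _ = out ++ ((if x ≠ "[ATGC]" then ["[ATGC]" ++ PySem.Str.join "" t] else [])
        ++ (pvMotifs t).map (fun m => x ++ m)).map (fun m => p ++ m)
      simp only [List.map_append, List.map_map]
      split_ifs <;> simp [List.append_assoc, String.append_assoc, Function.comp_def]
    · show (p ++ x) ++ PySem.Str.join "" t = p ++ (x ++ PySem.Str.join "" t)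
      exact String.append_assoc

-- ===== VERDICT (by name: the statement is the Claim_ definition above) =====
theorem create_box_one_mismatch_spec : Claim_equal_create_box_one_mismatch := by
  intro box_list _
  unfold Spec_create_box_one_mismatch create_box_one_mismatch create_box_one_mismatch_alt
  simp only []
  rw [pvA_eq_motifs box_list [], pvB_eq_motifs box_list [] ""]
  simp [String.empty_append]
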